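-- pv_equiv track=rewrite | github.com/medhuelabs/tmates-platform-oss | app/core/agent_runner.py | _parse_cancel_command
-- ===== SOURCE A (Python) =====
-- from typing import Dict, List, Optional, Sequence
--
-- _CANCEL_KEYWORDS = ("stop", "cancel")
--
-- def _parse_cancel_command(message: str) -> tuple[bool, Optional[str]]:
--     """Detect whether the user message is requesting a cancellation."""
--     if not message:
--         return False, None
--
--     normalised = message.strip().casefold()
--     if not normalised:
--         return False, None
--
--     for keyword in _CANCEL_KEYWORDS:
--         if normalised == keyword:
--             return True, None
--         if normalised.startswith(f"{keyword} "):
--             target = normalised[len(keyword) :].strip()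
--             return True, target or None
--
--     return False, None
-- ===== SOURCE B (Python) =====
-- _CANCEL_KEYWORDS = ("stop", "cancel")
--
-- def _parse_cancel_command(message: str):
--     """Detect cancellation by inspecting only the first word (one str.find pass)."""
--     normalised = message.strip().casefold()
--     i = normalised.find(' ')
--     head = normalised if i == -1 else normalised[:i]
--     if head not in _CANCEL_KEYWORDS:
--         return False, None
--     if i == -1:
--         return True, None
--     target = normalised[i + 1:].strip()
--     return True, target or None
-- ===== Notes on version B (the rewrite author's own statement) =====
-- stated objective: simpler
-- what changed: Instead of looping over the keyword tuple testing equality/startswith and re-slicing per keyword, B locates the first space once with str.find, compares the first word against the keyword tuple, and slices the remainder once.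
import Mathlib
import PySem

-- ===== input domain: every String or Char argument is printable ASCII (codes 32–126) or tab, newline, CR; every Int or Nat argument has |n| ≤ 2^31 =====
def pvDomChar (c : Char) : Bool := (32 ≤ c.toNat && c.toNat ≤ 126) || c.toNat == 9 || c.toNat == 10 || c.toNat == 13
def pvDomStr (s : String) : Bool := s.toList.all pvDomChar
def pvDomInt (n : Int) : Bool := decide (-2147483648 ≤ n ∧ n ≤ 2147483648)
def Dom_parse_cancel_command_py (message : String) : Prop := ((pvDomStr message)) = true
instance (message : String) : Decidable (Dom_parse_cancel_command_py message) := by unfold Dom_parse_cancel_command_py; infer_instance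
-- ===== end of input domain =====

-- B replaces A's per-keyword equality/startswith loop by one str.find for the first space
-- and a single first-word comparison (objective: simpler). casefold = lower, exact on the ASCII domain.

-- ===== PORT A =====
-- the for-loop over the two-element tuple _CANCEL_KEYWORDS is unrolled, branches in source order
def parse_cancel_command_py (message : String) : Bool × Option String :=
  if message == "" then (false, none)
  else
    let normalised := PySem.Str.lower (PySem.Str.strip message)  -- .strip().casefold(); casefold = lower on ASCII
    if normalised == "" then (false, none)
    else if normalised == "stop" then (true, none)
    else if PySem.Str.startswith normalised "stop " then
      let target := PySem.Str.strip (PySem.Str.slice normalised (some (PySem.Str.len "stop")) none)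
      (true, if target == "" then none else some target)
    else if normalised == "cancel" then (true, none)
    else if PySem.Str.startswith normalised "cancel " then
      let target := PySem.Str.strip (PySem.Str.slice normalised (some (PySem.Str.len "cancel")) none)
      (true, if target == "" then none else some target)
    else (false, none)

-- ===== PORT B =====
def parse_cancel_command_py_alt (message : String) : Bool × Option String :=
  let normalised := PySem.Str.lower (PySem.Str.strip message)
  let i := PySem.Str.find normalised " "
  let head := if i == -1 then normalised else PySem.Str.slice normalised none (some i)
  if !(head == "stop" || head == "cancel") then (false, none)
  else if i == -1 then (true, none)
  else
    let target := PySem.Str.strip (PySem.Str.slice normalised (some (i + 1)) none)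
    (true, if target == "" then none else some target)

-- ===== PRECONDITION & SPEC =====
def Spec_parse_cancel_command_py (message : String) (out : Bool × Option String) : Prop := out = parse_cancel_command_py_alt message
instance (message : String) (out : Bool × Option String) : Decidable (Spec_parse_cancel_command_py message out) := by unfold Spec_parse_cancel_command_py; infer_instance

-- ===== CLAIM (what is proved, stated in full; the proofs are below) =====
def Claim_equal_parse_cancel_command_py : Prop := ∀ (message : String), Dom_parse_cancel_command_py message → Spec_parse_cancel_command_py message (parse_cancel_command_py message)

-- ===== LEMMAS AND PROOFS =====

lemma pv_sgl_infix (c : Char) (l : List Char) : [c] <:+: l ↔ c ∈ l := by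
  constructor
  · rintro ⟨s, t, rfl⟩; simp
  · intro h
    obtain ⟨s, t, rfl⟩ := List.append_of_mem h
    exact ⟨s, t, by simp⟩

lemma pv_drop_cons (l : List Char) (m : ℕ) (h : [' '] <+: l.drop m) :
    l.drop m = ' ' :: l.drop (m + 1) ∧ m < l.length := by
  obtain ⟨t, ht⟩ := h
  have hlen : m < l.length := by
    by_contra hc
    have : l.drop m = [] := List.drop_eq_nil_of_le (by omega)
    rw [this] at ht; simp at ht
  have hdt : l.drop (m + 1) = t := by
    have := congrArg (List.drop 1) ht
    simpa [List.drop_drop, Nat.add_comm] using this.symm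
  exact ⟨by rw [hdt]; simpa using ht.symm, hlen⟩

-- first-word characterisation: with the first space at position m, 'kw ' is a prefix iff kw is the first word
lemma pv_take_eq_kw (l kw : List Char) (m : ℕ)
    (hd : l.drop m = ' ' :: l.drop (m + 1))
    (hmin : ∀ j, j < m → ¬ [' '] <+: l.drop j)
    (hkw : ' ' ∉ kw) :
    ((kw ++ [' ']) <+: l ↔ l.take m = kw) := by
  have hlen : m < l.length := by
    by_contra hc
    have : l.drop m = [] := List.drop_eq_nil_of_le (by omega)
    rw [this] at hd; simp at hd
  have h1' : l[m]? = some ' ' := by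
    have := congrArg List.head? hd
    simpa [List.head?_drop] using this
  constructor
  · rintro ⟨t, ht⟩
    have hl : l = kw ++ ' ' :: t := by rw [← ht]; simp
    have hdropkw : l.drop kw.length = ' ' :: t := by
      rw [hl, List.drop_left']
      rfl
    have hm_le : m ≤ kw.length := by
      by_contra hc
      exact hmin kw.length (by omega) ⟨t, by rw [hdropkw]; rfl⟩
    have hm_ge : kw.length ≤ m := by
      by_contra hc
      have hmk : m < kw.length := by omega
      have h2 : kw[m]? = some ' ' := by
        rw [← List.getElem?_append_left (l₂ := ' ' :: t) hmk, ← hl]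
        exact h1'
      exact hkw (List.mem_of_getElem? h2)
    have hm : m = kw.length := by omega
    rw [hl, hm, List.take_left]
  · intro htake
    have hleq : l = kw ++ ' ' :: l.drop (m + 1) := by
      conv_lhs => rw [← List.take_append_drop m l]
      rw [htake, hd]
    refine ⟨l.drop (m + 1), ?_⟩
    conv_rhs => rw [hleq]
    simp

lemma pv_strip_cons_space (b : List Char) :
    PySem.Chars.strip (' ' :: b) = PySem.Chars.strip b := by
  simp [PySem.Chars.strip, PySem.Chars.lstrip, List.dropWhile,
        show PySem.Chars.isspace ' ' = true from rfl]

lemma pv_core (n : String) :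
    (if n == "" then ((false : Bool), (none : Option String))
     else if n == "stop" then (true, none)
     else if PySem.Str.startswith n "stop " then
       let target := PySem.Str.strip (PySem.Str.slice n (some (PySem.Str.len "stop")) none)
       (true, if target == "" then none else some target)
     else if n == "cancel" then (true, none)
     else if PySem.Str.startswith n "cancel " then
       let target := PySem.Str.strip (PySem.Str.slice n (some (PySem.Str.len "cancel")) none)
       (true, if target == "" then none else some target)
     else (false, none)) =
    (let i := PySem.Str.find n " "
     let head := if i == -1 then n else PySem.Str.slice n none (some i)
     if !(head == "stop" || head == "cancel") then ((false : Bool), (none : Option String))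
     else if i == -1 then (true, none)
     else
       let target := PySem.Str.strip (PySem.Str.slice n (some (i + 1)) none)
       (true, if target == "" then none else some target)) := by
  by_cases hsp : ' ' ∈ n.toList
  · -- there is a space: both sides look only at the first word
    have hinf : [' '] <:+: n.toList := (pv_sgl_infix _ _).mpr hsp
    have hsptl : (" " : String).toList = [' '] := rfl
    have hi0 : 0 ≤ PySem.Str.find n " " := by
      rw [PySem.Str.find_eq, hsptl]
      exact (PySem.Chars.find_nonneg_iff _ _).mpr hinf
    set i := PySem.Str.find n " " with hidef
    set m := i.toNat with hmdef
    have him : i = (m : ℤ) := by omega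
    have hiff : PySem.Chars.findFrom n.toList [' '] (((0:ℕ) : ℤ)) = i := by
      rw [show (((0:ℕ)):ℤ) = 0 from rfl, PySem.Chars.findFrom_zero, ← hsptl]
      exact (PySem.Str.find_eq n " ").symm
    have hne : PySem.Chars.findFrom n.toList [' '] (((0:ℕ) : ℤ)) ≠ -1 := by
      rw [hiff]; omega
    obtain ⟨-, hpre, hminS⟩ := PySem.Chars.findFrom_natCast_spec n.toList [' '] 0 (Nat.zero_le _) hne
    rw [hiff] at hpre hminS
    have hmin : ∀ j, j < m → ¬ [' '] <+: n.toList.drop j := fun j hj => hminS j (Nat.zero_le _) hj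
    obtain ⟨hd, hlen⟩ := pv_drop_cons n.toList m hpre
    have hnnil : n.toList ≠ [] := by intro h; rw [h] at hsp; simp at hsp
    rw [him]
    have hmne : ¬ ((m : ℤ) = -1) := by omega
    have hnemp : ¬ n = "" := by intro h; subst h; exact hnnil (by decide)
    have hnostop : ¬ n = "stop" := by
      intro h; rw [h] at hsp; exact absurd hsp (by decide)
    have hnocanc : ¬ n = "cancel" := by
      intro h; rw [h] at hsp; exact absurd hsp (by decide)
    have hheadm : (PySem.Str.slice n none (some ((m : ℤ)))).toList = n.toList.take m := by
      rw [PySem.Str.toList_slice, PySem.Chars.slice_eq_listSlice,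
          PySem.List.slice_to _ (by omega : (0:ℤ) ≤ (m : ℤ))]
      simp
    by_cases hstop : n.toList.take m = ['s', 't', 'o', 'p']
    · -- first word is "stop"
      have hm4 : m = 4 := by
        have h := congrArg List.length hstop
        rw [List.length_take, Nat.min_eq_left (Nat.le_of_lt hlen)] at h
        exact h
      have hsw1 : PySem.Chars.startswith n.toList ['s', 't', 'o', 'p', ' '] = true := by
        rw [PySem.Chars.startswith_iff]
        exact (pv_take_eq_kw n.toList ['s', 't', 'o', 'p'] m hd hmin (by decide)).mpr hstop
      have hheadA : PySem.Str.slice n none (some ((m : ℤ))) = "stop" :=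
        String.toList_inj.mp (by rw [hheadm, hstop]; rfl)
      have htar : PySem.Str.strip (PySem.Str.slice n (some 4) none) =
          PySem.Str.strip (PySem.Str.slice n (some ((m : ℤ) + 1)) none) := by
        apply String.toList_inj.mp
        rw [PySem.Str.toList_strip, PySem.Str.toList_strip, PySem.Str.toList_slice,
            PySem.Str.toList_slice, PySem.Chars.slice_eq_listSlice, PySem.Chars.slice_eq_listSlice,
            PySem.List.slice_from _ (by omega : (0:ℤ) ≤ (4:ℤ)),
            PySem.List.slice_from _ (by omega : (0:ℤ) ≤ (m : ℤ) + 1)]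
        rw [show ((4:ℤ)).toNat = 4 from rfl, show ((m : ℤ) + 1).toNat = m + 1 by omega]
        rw [show (4:ℕ) = m from hm4.symm, hd, pv_strip_cons_space]
      simp [hnemp, hnostop, hsw1, hheadA, hmne, htar]
    · by_cases hcanc : n.toList.take m = ['c', 'a', 'n', 'c', 'e', 'l']
      · -- first word is "cancel"
        have hm6 : m = 6 := by
          have h := congrArg List.length hcanc
          rw [List.length_take, Nat.min_eq_left (Nat.le_of_lt hlen)] at h
          exact h
        have hsw1 : PySem.Chars.startswith n.toList ['s', 't', 'o', 'p', ' '] = false := by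
          rw [Bool.eq_false_iff]
          intro hp
          rw [PySem.Chars.startswith_iff] at hp
          exact hstop ((pv_take_eq_kw n.toList ['s', 't', 'o', 'p'] m hd hmin (by decide)).mp hp)
        have hsw2 : PySem.Chars.startswith n.toList ['c', 'a', 'n', 'c', 'e', 'l', ' '] = true := by
          rw [PySem.Chars.startswith_iff]
          exact (pv_take_eq_kw n.toList ['c', 'a', 'n', 'c', 'e', 'l'] m hd hmin (by decide)).mpr hcanc
        have hheadA : PySem.Str.slice n none (some ((m : ℤ))) = "cancel" :=
          String.toList_inj.mp (by rw [hheadm, hcanc]; rfl)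
        have htar : PySem.Str.strip (PySem.Str.slice n (some 6) none) =
            PySem.Str.strip (PySem.Str.slice n (some ((m : ℤ) + 1)) none) := by
          apply String.toList_inj.mp
          rw [PySem.Str.toList_strip, PySem.Str.toList_strip, PySem.Str.toList_slice,
              PySem.Str.toList_slice, PySem.Chars.slice_eq_listSlice, PySem.Chars.slice_eq_listSlice,
              PySem.List.slice_from _ (by omega : (0:ℤ) ≤ (6:ℤ)),
              PySem.List.slice_from _ (by omega : (0:ℤ) ≤ (m : ℤ) + 1)]
          rw [show ((6:ℤ)).toNat = 6 from rfl, show ((m : ℤ) + 1).toNat = m + 1 by omega]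
          rw [show (6:ℕ) = m from hm6.symm, hd, pv_strip_cons_space]
        simp [hnemp, hnostop, hnocanc, hsw1, hsw2, hheadA, hmne, htar]
      · -- first word is neither keyword: both return (False, None)
        have hsw1 : PySem.Chars.startswith n.toList ['s', 't', 'o', 'p', ' '] = false := by
          rw [Bool.eq_false_iff]
          intro hp
          rw [PySem.Chars.startswith_iff] at hp
          exact hstop ((pv_take_eq_kw n.toList ['s', 't', 'o', 'p'] m hd hmin (by decide)).mp hp)
        have hsw2 : PySem.Chars.startswith n.toList ['c', 'a', 'n', 'c', 'e', 'l', ' '] = false := by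
          rw [Bool.eq_false_iff]
          intro hp
          rw [PySem.Chars.startswith_iff] at hp
          exact hcanc ((pv_take_eq_kw n.toList ['c', 'a', 'n', 'c', 'e', 'l'] m hd hmin (by decide)).mp hp)
        have hh1 : ¬ PySem.Str.slice n none (some ((m : ℤ))) = "stop" := by
          intro h
          have := congrArg String.toList h
          rw [hheadm] at this
          exact hstop this
        have hh2 : ¬ PySem.Str.slice n none (some ((m : ℤ))) = "cancel" := by
          intro h
          have := congrArg String.toList h
          rw [hheadm] at this
          exact hcanc this
        simp [hnemp, hnostop, hnocanc, hsw1, hsw2, hh1, hh2, hmne]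
  · -- no space in n: only the exact-keyword branches can fire on either side
    have hsptl : (" " : String).toList = [' '] := rfl
    have hic : PySem.Chars.find n.toList [' '] = -1 := by
      rw [PySem.Chars.find_eq_neg_one_iff, pv_sgl_infix]
      exact hsp
    by_cases h0 : n = "stop"
    · subst h0; decide
    by_cases h1 : n = "cancel"
    · subst h1; decide
    by_cases he : n = ""
    · subst he; decide
    have hs1 : PySem.Chars.startswith n.toList ['s', 't', 'o', 'p', ' '] = false := by
      rw [Bool.eq_false_iff]
      intro hpre
      rw [PySem.Chars.startswith_iff] at hpre
      exact hsp (hpre.sublist.subset (by decide))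
    have hs2 : PySem.Chars.startswith n.toList ['c', 'a', 'n', 'c', 'e', 'l', ' '] = false := by
      rw [Bool.eq_false_iff]
      intro hpre
      rw [PySem.Chars.startswith_iff] at hpre
      exact hsp (hpre.sublist.subset (by decide))
    simp [hic, hs1, hs2, h0, h1, he]

-- ===== VERDICT (by name: the statement is the Claim_ definition above) =====
theorem parse_cancel_command_py_spec : Claim_equal_parse_cancel_command_py := by
  intro message _
  unfold Spec_parse_cancel_command_py parse_cancel_command_py parse_cancel_command_py_alt
  by_cases hm : message = ""
  · subst hm; decide
  · rw [if_neg (by simpa using hm)]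
    exact pv_core (PySem.Str.lower (PySem.Str.strip message))
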